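-- pv_equiv track=rewrite | github.com/KimSooHyo/CodingTest-Practice | Python3/프로그래머스/2/42586. 기능개발/기능개발.py | solution
-- ===== SOURCE A (Python) =====
-- import math
--
-- def solution(progresses, speeds):
--     answer = []
--     n = len(progresses)
--
--     #각 작업의 배포 가능일 계산
--     days = [math.ceil((100-progresses[i])/speeds[i]) for i in range(n)]
--
--     count = 0
--     max_day = days[0]
--
--     for i in range(n):
--         if max_day >= days[i]:
--             count += 1
--         else:
--             answer.append(count)
--             count = 1
--             max_day = days[i]
--
--     answer.append(count)
--     return answer
-- ===== SOURCE B (Python) =====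
-- import math
--
-- def solution(progresses, speeds):
--     days = [math.ceil((100 - p) / s) for p, s in zip(progresses, speeds)]
--     answer = []
--     while days:
--         leader = days[0]
--         k = 1
--         while k < len(days) and days[k] <= leader:
--             k += 1
--         answer.append(k)
--         days = days[k:]
--     return answer
-- ===== Notes on version B (the rewrite author's own statement) =====
-- stated objective: alternative
-- what changed: A makes one flat pass carrying a running max_day and a counter; B consumes the days list group by group with a nested scan that counts the consecutive elements not exceeding each group leader and then drops them.
import Mathlib
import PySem

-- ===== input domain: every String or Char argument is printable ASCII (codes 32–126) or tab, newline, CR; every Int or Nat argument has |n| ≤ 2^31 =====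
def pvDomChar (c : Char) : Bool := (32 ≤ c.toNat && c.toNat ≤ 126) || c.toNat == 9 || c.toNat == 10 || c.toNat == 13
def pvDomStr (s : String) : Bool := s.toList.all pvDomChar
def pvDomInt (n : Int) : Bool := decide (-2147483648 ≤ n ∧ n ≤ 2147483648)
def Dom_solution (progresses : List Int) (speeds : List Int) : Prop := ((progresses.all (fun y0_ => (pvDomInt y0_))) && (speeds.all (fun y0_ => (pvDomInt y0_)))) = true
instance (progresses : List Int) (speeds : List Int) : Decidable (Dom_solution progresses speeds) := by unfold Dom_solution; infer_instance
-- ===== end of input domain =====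

-- B consumes the days list group by group (nested scan per group leader) instead of A's flat
-- single pass with a running max; same result, same cost ("alternative").
-- math.ceil((100-p)/s) is ported as the exact integer ceiling -((-(100-p)) // s), which agrees
-- with Python's float computation on the whole Dom (|values| ≤ 2^31+100 < 2^53).

-- ===== PORT A =====
def pyCeilDiv (a b : Int) : Int := -(PySem.Int.floordiv (-a) b)

def solution (progresses : List Int) (speeds : List Int) : List Int :=
  let n : Int := progresses.length
  let days : List Int := (PySem.List.pyRange 0 n 1).map (fun i =>
    pyCeilDiv (100 - PySem.List.pyGetD progresses i 0) (PySem.List.pyGetD speeds i 0))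
  let maxDay := PySem.List.pyGetD days 0 0
  let st := (PySem.List.pyRange 0 n 1).foldl
    (fun (st : List Int × Int × Int) i =>
      let d := PySem.List.pyGetD days i 0
      if st.2.2 ≥ d then (st.1, st.2.1 + 1, st.2.2)
      else (st.1 ++ [st.2.1], 1, d))
    ([], 0, maxDay)
  st.1 ++ [st.2.1]

-- ===== PORT B =====
-- inner while loop: number of leading elements of the remainder that are ≤ the group leader
def countLe (leader : Int) : List Int → Nat
  | [] => 0
  | d :: rest => if d ≤ leader then countLe leader rest + 1 else 0

-- outer while loop: emit the group size, drop the group, continue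
def altGroups : List Int → List Int
  | [] => []
  | d :: rest =>
    let k := countLe d rest
    ((k : Int) + 1) :: altGroups (rest.drop k)
termination_by l => l.length
decreasing_by simp

def solution_alt (progresses : List Int) (speeds : List Int) : List Int :=
  altGroups ((progresses.zip speeds).map (fun ps => pyCeilDiv (100 - ps.1) ps.2))

-- ===== PRECONDITION & SPEC =====
-- Pre_ excludes exactly the inputs where A raises: empty progresses (IndexError on days[0]),
-- speeds shorter than progresses (IndexError), and a zero speed in the used range (ZeroDivisionError).
def Pre_solution (progresses : List Int) (speeds : List Int) : Prop :=
  progresses ≠ [] ∧ progresses.length ≤ speeds.length ∧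
    ∀ s ∈ speeds.take progresses.length, s ≠ 0
instance (progresses : List Int) (speeds : List Int) : Decidable (Pre_solution progresses speeds) := by
  unfold Pre_solution; infer_instance

def pvWitness_solution : List Int × List Int := ([93, 30, 55], [1, 30, 5])

def Spec_solution (progresses : List Int) (speeds : List Int) (out : List Int) : Prop := out = solution_alt progresses speeds
instance (progresses : List Int) (speeds : List Int) (out : List Int) : Decidable (Spec_solution progresses speeds out) := by unfold Spec_solution; infer_instance

-- ===== CLAIM (what is proved, stated in full; the proofs are below) =====
def Claim_equal_solution : Prop := ∀ (progresses : List Int) (speeds : List Int), Dom_solution progresses speeds → Pre_solution progresses speeds → Spec_solution progresses speeds (solution progresses speeds)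

-- ===== LEMMAS AND PROOFS =====

-- A's loop body, with the current day already looked up
def stepA (st : List Int × Int × Int) (d : Int) : List Int × Int × Int :=
  if st.2.2 ≥ d then (st.1, st.2.1 + 1, st.2.2)
  else (st.1 ++ [st.2.1], 1, d)

-- the tail of A's loop, answer prefix factored out
def goA (c m : Int) : List Int → List Int
  | [] => [c]
  | d :: rest => if m ≥ d then goA (c + 1) m rest else c :: goA 1 d rest

lemma foldl_stepA (L : List Int) : ∀ (ans : List Int) (c m : Int),
    (L.foldl stepA (ans, c, m)).1 ++ [(L.foldl stepA (ans, c, m)).2.1] = ans ++ goA c m L := by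
  induction L with
  | nil => intro ans c m; simp [goA]
  | cons d rest ih =>
    intro ans c m
    by_cases h : m ≥ d
    · simp [stepA, goA, h, ih]
    · simp [stepA, goA, h, ih]

lemma altGroups_nil : altGroups [] = [] := by rw [altGroups]

lemma altGroups_cons (d : Int) (rest : List Int) :
    altGroups (d :: rest) = ((countLe d rest : Int) + 1) :: altGroups (rest.drop (countLe d rest)) := by
  rw [altGroups]

lemma goA_eq (L : List Int) : ∀ (c m : Int),
    goA c m L = (c + (countLe m L : Int)) :: altGroups (L.drop (countLe m L)) := by
  induction L with
  | nil => intro c m; simp [goA, countLe, altGroups_nil]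
  | cons d rest ih =>
    intro c m
    by_cases h : d ≤ m
    · simp only [goA, if_pos (show m ≥ d from h)]
      rw [ih]
      simp only [countLe, if_pos h, List.drop_succ_cons]
      congr 1
      push_cast
      ring
    · simp only [goA, if_neg (show ¬ m ≥ d from h)]
      rw [ih]
      simp only [countLe, if_neg h, Nat.cast_zero, List.drop_zero]
      rw [altGroups_cons]
      congr 1
      · ring
      · congr 1
        omega

-- days as computed by A equals days as computed by B
lemma days_eq (g : Int → Int → Int) (progresses speeds : List Int)
    (hle : progresses.length ≤ speeds.length) :
    (PySem.List.pyRange 0 (progresses.length : Int) 1).map (fun i =>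
        g (PySem.List.pyGetD progresses i 0) (PySem.List.pyGetD speeds i 0))
      = (progresses.zip speeds).map (fun ps => g ps.1 ps.2) := by
  apply List.ext_getElem
  · simp [PySem.List.length_pyRange_one]; omega
  · intro k h1 h2
    have hk : k < progresses.length := by
      simpa [PySem.List.length_pyRange_one] using h1
    have hks : k < speeds.length := lt_of_lt_of_le hk hle
    simp [PySem.List.getElem_pyRange_one, PySem.List.pyGetD_natCast,
      List.getD_eq_getElem?_getD, List.getElem?_eq_getElem, hk, hks]

theorem solution_spec : Claim_equal_solution := by
  intro progresses speeds _ hpre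
  obtain ⟨hne, hle, _⟩ := hpre
  unfold Spec_solution solution solution_alt
  simp only []
  rw [days_eq (fun p s => pyCeilDiv (100 - p) s) progresses speeds hle]
  set days := (progresses.zip speeds).map (fun ps => pyCeilDiv (100 - ps.1) ps.2) with hdays
  have hlen : (progresses.length : Int) = (days.length : Int) := by
    simp [hdays]; omega
  rw [hlen]
  have hstep : (fun (st : List Int × Int × Int) i =>
      if st.2.2 ≥ PySem.List.pyGetD days i 0 then (st.1, st.2.1 + 1, st.2.2)
      else (st.1 ++ [st.2.1], 1, PySem.List.pyGetD days i 0))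
    = (fun (st : List Int × Int × Int) i => stepA st (PySem.List.pyGetD days i 0)) := rfl
  rw [hstep, PySem.List.foldl_pyRange_zero_pyGetD' days 0 stepA]
  have hdne : days ≠ [] := by
    intro h
    have h2 : days.length = min progresses.length speeds.length := by simp [hdays]
    rw [h] at h2
    simp at h2
    have hp : 0 < progresses.length := List.length_pos_iff.mpr hne
    omega
  obtain ⟨d0, rest, hcons⟩ := List.exists_cons_of_ne_nil hdne
  rw [hcons]
  have hfold := foldl_stepA (d0 :: rest) [] 0 (PySem.List.pyGetD (d0 :: rest) 0 0)
  rw [List.nil_append] at hfold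
  rw [hfold]
  simp only [PySem.List.pyGetD_zero_cons, goA, ge_iff_le, le_refl, if_true]
  rw [goA_eq, altGroups_cons]
  congr 1
  push_cast; ring

-- ===== VERDICT (by name: the statement is the Claim_ definition above) =====
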